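-- pv_equiv track=rewrite | github.com/hbsulab/L-index | ImportantFunc.py | sumsimilar
-- ===== SOURCE A (Python) =====
-- def sumsimilar(criteria,ele):
--     element = []
--     freque = []
--     if not criteria:
--         return element,freque
--     if len(criteria) == 1:
--         element.append(criteria[0])
--         freque.append(ele[0])
--     else:
--         running_count = ele[0]
--         for i in range(len(criteria)-1):
--             if criteria[i] == criteria[i+1]:
--                 running_count += ele[i+1]
--             else:
--                 freque.append(running_count)
--                 element.append(criteria[i])
--                 running_count = ele[i+1]
--
--         freque.append(running_count)
--         element.append(criteria[i+1])
--     return element,freque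
-- ===== SOURCE B (Python) =====
-- def sumsimilar(criteria, ele):
--     # Split criteria into maximal runs of equal values with a two-pointer scan
--     # and sum the corresponding ele entries of each run.
--     element = []
--     freque = []
--     i, n = 0, len(criteria)
--     while i < n:
--         j = i
--         s = 0
--         while j < n and criteria[j] == criteria[i]:
--             s += ele[j]
--             j += 1
--         element.append(criteria[i])
--         freque.append(s)
--         i = j
--     return element, freque
-- ===== Notes on version B (the rewrite author's own statement) =====
-- stated objective: alternative
-- what changed: Replaces A's adjacent-comparison single scan with a leftover running count by splitting criteria into maximal runs of equal values with a two-pointer scan and summing each run's ele entries.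
import Mathlib
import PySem

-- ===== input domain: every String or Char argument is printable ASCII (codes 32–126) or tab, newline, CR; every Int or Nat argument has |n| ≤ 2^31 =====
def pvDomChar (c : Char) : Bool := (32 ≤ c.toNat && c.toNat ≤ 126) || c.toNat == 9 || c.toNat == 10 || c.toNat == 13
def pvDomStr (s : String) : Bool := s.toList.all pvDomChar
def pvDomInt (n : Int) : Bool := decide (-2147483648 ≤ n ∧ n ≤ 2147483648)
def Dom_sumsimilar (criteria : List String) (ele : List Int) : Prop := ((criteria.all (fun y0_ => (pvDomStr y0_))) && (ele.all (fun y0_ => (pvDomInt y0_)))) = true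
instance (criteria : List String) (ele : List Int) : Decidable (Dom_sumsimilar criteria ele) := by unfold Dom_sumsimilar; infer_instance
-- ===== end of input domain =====

-- B groups the zipped pairs into maximal runs of equal criteria and sums each run,
-- instead of A's adjacent-comparison scan with a running count; same cost (alternative).

-- ===== PORT A =====
def sumsimilar (criteria : List String) (ele : List Int) : List String × List Int :=
  if criteria.length = 0 then ([], [])
  else if criteria.length = 1 then
    ([PySem.List.pyGetD criteria 0 ""], [PySem.List.pyGetD ele 0 0])
  else
    -- for i in range(len(criteria)-1): state = (element, freque, running_count)
    let st := (PySem.List.pyRange 0 ((criteria.length : Int) - 1) 1).foldl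
      (fun (st : List String × List Int × Int) i =>
        if PySem.List.pyGetD criteria i "" = PySem.List.pyGetD criteria (i + 1) "" then
          (st.1, st.2.1, st.2.2 + PySem.List.pyGetD ele (i + 1) 0)
        else
          (st.1 ++ [PySem.List.pyGetD criteria i ""], st.2.1 ++ [st.2.2],
           PySem.List.pyGetD ele (i + 1) 0))
      ([], [], PySem.List.pyGetD ele 0 0)
    -- after the loop i = len(criteria)-2, so criteria[i+1] is criteria[len-1]
    (st.1 ++ [PySem.List.pyGetD criteria ((criteria.length : Int) - 1) ""], st.2.1 ++ [st.2.2])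

-- ===== PORT B =====
-- Source B's outer while consumes one maximal run of equal criteria per iteration (the
-- inner while sums the matching ele entries and advances j past the run); ported as
-- structural recursion where the inner while over criteria[i..j) is takeWhile/dropWhile
-- on the remaining suffix, and the ele[j] accesses of a run of length t+1 are the sum
-- of the first t+1 remaining ele entries (List.take; exact whenever ele is long enough,
-- i.e. on Pre_).
def altRuns : List String → List Int → List String × List Int
  | [], _ => ([], [])
  | k :: cs, vs =>
    let t := cs.takeWhile (fun c => c == k)
    let rest := cs.dropWhile (fun c => c == k)
    let s := (vs.take (t.length + 1)).sum
    let r := altRuns rest (vs.drop (t.length + 1))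
    (k :: r.1, s :: r.2)
termination_by criteria _ => criteria.length
decreasing_by simpa using Nat.lt_succ_of_le (List.length_dropWhile_le _ _)

def sumsimilar_alt (criteria : List String) (ele : List Int) : List String × List Int :=
  altRuns criteria ele

-- ===== PRECONDITION & SPEC =====
-- A indexes ele[0..len(criteria)-1]; it raises IndexError iff criteria is non-empty and
-- ele is shorter than criteria — exactly those inputs are excluded.
def Pre_sumsimilar (criteria : List String) (ele : List Int) : Prop :=
  criteria ≠ [] → criteria.length ≤ ele.length
instance (criteria : List String) (ele : List Int) : Decidable (Pre_sumsimilar criteria ele) := by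
  unfold Pre_sumsimilar; infer_instance

def pvWitness_sumsimilar : List String × List Int := (["a", "a", "b"], [1, 2, 3])

def Spec_sumsimilar (criteria : List String) (ele : List Int) (out : List String × List Int) : Prop := out = sumsimilar_alt criteria ele
instance (criteria : List String) (ele : List Int) (out : List String × List Int) : Decidable (Spec_sumsimilar criteria ele out) := by unfold Spec_sumsimilar; infer_instance

-- ===== CLAIM (what is proved, stated in full; the proofs are below) =====
def Claim_equal_sumsimilar : Prop := ∀ (criteria : List String) (ele : List Int), Dom_sumsimilar criteria ele → Pre_sumsimilar criteria ele → Spec_sumsimilar criteria ele (sumsimilar criteria ele)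

-- ===== LEMMAS AND PROOFS =====

-- A's loop body, as a function of the triple (criteria[i], criteria[i+1], ele[i+1]).
def gstep (st : List String × List Int × Int) (t : String × String × Int) :
    List String × List Int × Int :=
  if t.1 = t.2.1 then (st.1, st.2.1, st.2.2 + t.2.2)
  else (st.1 ++ [t.1], st.2.1 ++ [st.2.2], t.2.2)

-- the triples A's loop reads, as a zip
lemma map_idx (criteria : List String) (ele : List Int)
    (h1 : 2 ≤ criteria.length) (h2 : criteria.length ≤ ele.length) :
    (PySem.List.pyRange 0 ((criteria.length : Int) - 1) 1).map
      (fun i => (PySem.List.pyGetD criteria i "", PySem.List.pyGetD criteria (i + 1) "",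
                 PySem.List.pyGetD ele (i + 1) 0))
    = criteria.dropLast.zip (criteria.tail.zip ele.tail) := by
  apply List.ext_getElem
  · simp [PySem.List.length_pyRange_one]
    omega
  · intro j hj hj'
    simp only [List.getElem_map, PySem.List.getElem_pyRange_one, List.getElem_zip,
      List.getElem_dropLast, List.getElem_tail]
    have hjn : j < criteria.length - 1 := by
      simp [PySem.List.length_pyRange_one] at hj; omega
    rw [show (0 : Int) + (j : Int) + 1 = (((j + 1 : Nat)) : Int) from by push_cast; ring,
        show (0 : Int) + (j : Int) = ((j : Nat) : Int) from by ring,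
        PySem.List.pyGetD_natCast, PySem.List.pyGetD_natCast, PySem.List.pyGetD_natCast]
    rw [List.getD_eq_getElem _ _ (by omega), List.getD_eq_getElem _ _ (by omega),
        List.getD_eq_getElem _ _ (by omega)]

lemma altRuns_merge (k : String) (v v' : Int) (cs : List String) (vs : List Int) :
    altRuns (k :: k :: cs) (v :: v' :: vs) = altRuns (k :: cs) ((v + v') :: vs) := by
  simp [altRuns, List.take_succ_cons, add_assoc]

lemma altRuns_ne (k k' : String) (v v' : Int) (cs : List String) (vs : List Int)
    (h : k ≠ k') :
    altRuns (k :: k' :: cs) (v :: v' :: vs)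
      = (k :: (altRuns (k' :: cs) (v' :: vs)).1, v :: (altRuns (k' :: cs) (v' :: vs)).2) := by
  have hb : (k' == k) = false := by simp [Ne.symm h]
  simp [altRuns, hb]

lemma getLastD_cons' (a d : String) (l : List String) : (a :: l).getLastD d = l.getLastD a := by
  cases l <;> simp [List.getLastD]

lemma runs_loop : ∀ (cs : List String) (vs : List Int) (k : String) (v : Int)
    (es : List String) (fs : List Int), cs.length ≤ vs.length →
    (let st := (((k :: cs).dropLast).zip (cs.zip vs)).foldl gstep (es, fs, v)
     ((st.1 ++ [cs.getLastD k], st.2.1 ++ [st.2.2]) : List String × List Int))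
    = (es ++ (altRuns (k :: cs) (v :: vs)).1, fs ++ (altRuns (k :: cs) (v :: vs)).2) := by
  intro cs
  induction cs with
  | nil =>
    intro vs k v es fs _
    simp [altRuns]
  | cons k' cs' ih =>
    intro vs k v es fs hlen
    cases vs with
    | nil => simp at hlen
    | cons v' vs' =>
      have hz : (((k :: k' :: cs').dropLast).zip ((k', v') :: cs'.zip vs'))
          = (k, k', v') :: (((k' :: cs').dropLast).zip (cs'.zip vs')) := by
        simp [List.dropLast_cons_of_ne_nil]
      simp only [List.zip_cons_cons]
      rw [hz]
      simp only [List.foldl_cons]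
      by_cases hk : k = k'
      · subst hk
        have hg : gstep (es, fs, v) (k, k, v') = (es, fs, v + v') := by simp [gstep]
        rw [hg, altRuns_merge, getLastD_cons' k k cs']
        exact ih vs' k (v + v') es fs (by simpa using hlen)
      · have hg : gstep (es, fs, v) (k, k', v') = (es ++ [k], fs ++ [v], v') := by
          simp [gstep, hk]
        rw [hg, altRuns_ne k k' v v' _ _ hk, getLastD_cons' k' k cs',
            show es ++ k :: (altRuns (k' :: cs') (v' :: vs')).1
              = (es ++ [k]) ++ (altRuns (k' :: cs') (v' :: vs')).1 from by simp,
            show fs ++ v :: (altRuns (k' :: cs') (v' :: vs')).2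
              = (fs ++ [v]) ++ (altRuns (k' :: cs') (v' :: vs')).2 from by simp]
        exact ih vs' k' v' (es ++ [k]) (fs ++ [v]) (by simpa using hlen)

-- ===== VERDICT (by name: the statement is the Claim_ definition above) =====
theorem sumsimilar_spec : Claim_equal_sumsimilar := by
  intro criteria ele _ hpre
  unfold Spec_sumsimilar
  match criteria, ele with
  | [], _ => simp [sumsimilar, sumsimilar_alt, altRuns]
  | [k], ele =>
    cases ele with
    | nil => exact absurd (hpre (by simp)) (by simp)
    | cons v vs =>
      simp [sumsimilar, sumsimilar_alt, altRuns, PySem.List.pyGetD_zero_cons]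
  | k :: k' :: cs, ele =>
    have hlen : (k :: k' :: cs).length ≤ ele.length := hpre (by simp)
    cases ele with
    | nil => simp at hlen
    | cons v vs =>
      have h2 : 2 ≤ (k :: k' :: cs).length := by simp
      have hne0 : ¬ (k :: k' :: cs).length = 0 := by simp
      have hne1 : ¬ (k :: k' :: cs).length = 1 := by simp
      rw [sumsimilar]
      simp only [hne0, hne1, if_false]
      rw [show (fun (st : List String × List Int × Int) (i : Int) =>
            if PySem.List.pyGetD (k :: k' :: cs) i "" = PySem.List.pyGetD (k :: k' :: cs) (i + 1) "" then
              (st.1, st.2.1, st.2.2 + PySem.List.pyGetD (v :: vs) (i + 1) 0)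
            else
              (st.1 ++ [PySem.List.pyGetD (k :: k' :: cs) i ""], st.2.1 ++ [st.2.2],
               PySem.List.pyGetD (v :: vs) (i + 1) 0))
          = (fun st i => gstep st (PySem.List.pyGetD (k :: k' :: cs) i "",
              PySem.List.pyGetD (k :: k' :: cs) (i + 1) "",
              PySem.List.pyGetD (v :: vs) (i + 1) 0)) from rfl,
        ← List.foldl_map, map_idx (k :: k' :: cs) (v :: vs) h2 hlen]
      have hlast : PySem.List.pyGetD (k :: k' :: cs) (((k :: k' :: cs).length : Int) - 1) ""
          = (k' :: cs).getLastD k := by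
        have e : (((k :: k' :: cs).length : Int) - 1) = (((k' :: cs).length : Nat) : Int) := by
          rw [List.length_cons]; push_cast; ring
        rw [e, PySem.List.pyGetD_natCast, List.getD_eq_getElem _ _ (by simp)]
        rw [List.getLastD_eq_getLast?, List.getLast?_eq_getElem?]
        simp
        rfl
      rw [PySem.List.pyGetD_zero_cons, hlast]
      have := runs_loop (k' :: cs) vs k v [] [] (by simpa using hlen)
      simp only [List.nil_append] at this
      simpa [sumsimilar_alt] using this
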